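-- pv_equiv track=rewrite | github.com/Lblackie1/OrganGeometry | BnlCurvatureCorrelation/FGF_Curvature_Registration.py | orderNames
-- ===== SOURCE A (Python) =====
-- def orderNames(oldNames):
--     newNames = []
--
--     for name in oldNames:
--         if name[0]== "F":
--             newNames.append(name)
--
--     for name in oldNames:
--         if name[0]== "V":
--             newNames.append(name)
--
--     for name in oldNames:
--         if name[0]== "M":
--             newNames.append(name)
--
--     return newNames
-- ===== SOURCE B (Python) =====
-- def orderNames(oldNames):
--     rank = {"F": 0, "V": 1, "M": 2}
--     return sorted((n for n in oldNames if n[0] in rank), key=lambda n: rank[n[0]])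
-- ===== Notes on version B (the rewrite author's own statement) =====
-- stated objective: simpler
-- what changed: Replaces A's three full scans (one per initial letter F, V, M) with a single filtering pass followed by one stable sort keyed by a rank table, relying on sort stability to preserve within-group order.
import Mathlib
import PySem

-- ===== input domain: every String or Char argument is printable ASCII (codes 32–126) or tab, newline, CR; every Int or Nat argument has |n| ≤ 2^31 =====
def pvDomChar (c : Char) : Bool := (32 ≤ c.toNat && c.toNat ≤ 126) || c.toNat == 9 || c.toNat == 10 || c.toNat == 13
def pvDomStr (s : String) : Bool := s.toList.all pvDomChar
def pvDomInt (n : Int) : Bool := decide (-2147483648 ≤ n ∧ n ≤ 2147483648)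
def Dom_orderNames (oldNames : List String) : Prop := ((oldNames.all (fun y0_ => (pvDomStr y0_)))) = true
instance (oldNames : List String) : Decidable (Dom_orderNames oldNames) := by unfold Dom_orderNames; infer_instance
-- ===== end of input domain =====

-- B replaces A's three scans (one per initial letter) by one filter plus one stable sort keyed by a rank table (objective: simpler).
-- Pre_ excludes inputs containing the empty string, on which both Pythons raise IndexError at name[0].


-- ===== PORT A =====
-- three passes over oldNames appending matches into newNames: the 'F' pass, then the 'V' pass, then the 'M' pass
def orderNames (oldNames : List String) : List String :=
  oldNames.foldl (fun acc name => if PySem.Str.pyGet? name 0 == some 'M' then acc ++ [name] else acc)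
    (oldNames.foldl (fun acc name => if PySem.Str.pyGet? name 0 == some 'V' then acc ++ [name] else acc)
      (oldNames.foldl (fun acc name => if PySem.Str.pyGet? name 0 == some 'F' then acc ++ [name] else acc) []))

-- ===== PORT B =====
-- rank = {"F": 0, "V": 1, "M": 2}
def pvRank : PySem.Dict Char Int := PySem.Dict.ofList [('F', 0), ('V', 1), ('M', 2)]
-- key=lambda n: rank[n[0]]  (total form; the filter only keeps names whose lookup succeeds)
def pvKey (n : String) : Int := ((PySem.Str.pyGet? n 0).bind (fun c => pvRank.get? c)).getD 0
-- sorted((n for n in oldNames if n[0] in rank), key=lambda n: rank[n[0]]) — stable sort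
def orderNames_alt (oldNames : List String) : List String :=
  PySem.List.sorted
    (oldNames.filter (fun n => ((PySem.Str.pyGet? n 0).bind (fun c => pvRank.get? c)).isSome))
    pvKey

-- ===== PRECONDITION & SPEC =====
-- Pre_ excludes lists containing the empty string: there name[0] raises IndexError in A (and likewise in B).
def Pre_orderNames (oldNames : List String) : Prop := "" ∉ oldNames
instance (oldNames : List String) : Decidable (Pre_orderNames oldNames) := by unfold Pre_orderNames; infer_instance
def pvWitness_orderNames : List String := ["Fgf10", "Vein", "Mad", "bnl"]
def Spec_orderNames (oldNames : List String) (out : List String) : Prop := out = orderNames_alt oldNames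
instance (oldNames : List String) (out : List String) : Decidable (Spec_orderNames oldNames out) := by unfold Spec_orderNames; infer_instance

-- ===== CLAIM (what is proved, stated in full; the proofs are below) =====
def Claim_equal_orderNames : Prop := ∀ (oldNames : List String), Dom_orderNames oldNames → Pre_orderNames oldNames → Spec_orderNames oldNames (orderNames oldNames)

-- ===== LEMMAS AND PROOFS =====

-- inserting behind a block it does not go before
theorem pv_insertBy_append {α : Type} (before : α → α → Bool) (x : α) (as bs : List α)
    (h : ∀ a ∈ as, before x a = false) :
    PySem.List.insertBy before x (as ++ bs) = as ++ PySem.List.insertBy before x bs := by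
  induction as with
  | nil => simp
  | cons a as ih =>
      have ha : before x a = false := h a (by simp)
      simp [PySem.List.insertBy, ha, ih (fun a ha' => h a (by simp [ha']))]

-- inserting in front of a block it goes before
theorem pv_insertBy_front {α : Type} (before : α → α → Bool) (x : α) (bs : List α)
    (h : ∀ b ∈ bs, before x b = true) :
    PySem.List.insertBy before x bs = x :: bs := by
  cases bs with
  | nil => simp [PySem.List.insertBy]
  | cons b bs => simp [PySem.List.insertBy, h b (by simp)]

-- stable insertion sort of a list with keys in {0,1,2} is the three-bucket concatenation
theorem pv_buckets {α : Type} (key : α → Int) (ys b0 b1 b2 : List α)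
    (hy : ∀ y ∈ ys, key y = 0 ∨ key y = 1 ∨ key y = 2)
    (h0 : ∀ a ∈ b0, key a = 0) (h1 : ∀ a ∈ b1, key a = 1) (h2 : ∀ a ∈ b2, key a = 2) :
    ys.foldl (fun acc x => PySem.List.insertBy (fun a b => decide (key a < key b)) x acc) (b0 ++ b1 ++ b2) =
      (b0 ++ ys.filter (fun y => key y == 0)) ++ (b1 ++ ys.filter (fun y => key y == 1)) ++
        (b2 ++ ys.filter (fun y => key y == 2)) := by
  induction ys generalizing b0 b1 b2 with
  | nil => simp
  | cons y ys ih =>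
      have hy' : ∀ z ∈ ys, key z = 0 ∨ key z = 1 ∨ key z = 2 := fun z hz => hy z (by simp [hz])
      rcases hy y (by simp) with hk | hk | hk
      · have hb : ∀ a ∈ b0, (fun a b => decide (key a < key b)) y a = false := by
          intro a ha; simp [h0 a ha, hk]
        have hf : ∀ b ∈ b1 ++ b2, (fun a b => decide (key a < key b)) y b = true := by
          intro b hb'
          rcases List.mem_append.mp hb' with h | h
          · simp [h1 b h, hk]
          · simp [h2 b h, hk]
        have step : PySem.List.insertBy (fun a b => decide (key a < key b)) y (b0 ++ b1 ++ b2) =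
            (b0 ++ [y]) ++ b1 ++ b2 := by
          rw [List.append_assoc, pv_insertBy_append _ _ _ _ hb, pv_insertBy_front _ _ _ hf]
          simp
        have h0' : ∀ a ∈ b0 ++ [y], key a = 0 := by
          intro a ha
          rcases List.mem_append.mp ha with ha | ha
          · exact h0 a ha
          · simp at ha; simpa [ha] using hk
        rw [List.foldl_cons, step, ih (b0 ++ [y]) b1 b2 hy' h0' h1 h2]
        simp [hk]
      · have hb : ∀ a ∈ b0 ++ b1, (fun a b => decide (key a < key b)) y a = false := by
          intro a ha
          rcases List.mem_append.mp ha with h | h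
          · simp [h0 a h, hk]
          · simp [h1 a h, hk]
        have hf : ∀ b ∈ b2, (fun a b => decide (key a < key b)) y b = true := by
          intro b h; simp [h2 b h, hk]
        have step : PySem.List.insertBy (fun a b => decide (key a < key b)) y (b0 ++ b1 ++ b2) =
            b0 ++ (b1 ++ [y]) ++ b2 := by
          rw [pv_insertBy_append _ _ _ _ hb, pv_insertBy_front _ _ _ hf]
          simp
        have h1' : ∀ a ∈ b1 ++ [y], key a = 1 := by
          intro a ha
          rcases List.mem_append.mp ha with ha | ha
          · exact h1 a ha
          · simp at ha; simpa [ha] using hk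
        rw [List.foldl_cons, step, ih b0 (b1 ++ [y]) b2 hy' h0 h1' h2]
        simp [hk]
      · have hb : ∀ a ∈ b0 ++ b1 ++ b2, (fun a b => decide (key a < key b)) y a = false := by
          intro a ha
          rcases List.mem_append.mp ha with h | h
          · rcases List.mem_append.mp h with h' | h'
            · simp [h0 a h', hk]
            · simp [h1 a h', hk]
          · simp [h2 a h, hk]
        have step : PySem.List.insertBy (fun a b => decide (key a < key b)) y (b0 ++ b1 ++ b2) =
            b0 ++ b1 ++ (b2 ++ [y]) := by
          have := pv_insertBy_append (fun a b => decide (key a < key b)) y (b0 ++ b1 ++ b2) [] hb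
          simpa [PySem.List.insertBy] using this
        have h2' : ∀ a ∈ b2 ++ [y], key a = 2 := by
          intro a ha
          rcases List.mem_append.mp ha with ha | ha
          · exact h2 a ha
          · simp at ha; simpa [ha] using hk
        rw [List.foldl_cons, step, ih b0 b1 (b2 ++ [y]) hy' h0 h1 h2']
        simp [hk]

-- the rank dictionary, characterised
theorem pvRank_get (ch : Char) : pvRank.get? ch =
    if ch = 'F' then some 0 else if ch = 'V' then some 1 else if ch = 'M' then some 2 else none := by
  have h : pvRank.items = [('F', 0), ('V', 1), ('M', 2)] := by decide
  have e1 : ('F' == ch) = (ch == 'F') := BEq.comm ..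
  have e2 : ('V' == ch) = (ch == 'V') := BEq.comm ..
  have e3 : ('M' == ch) = (ch == 'M') := BEq.comm ..
  simp only [PySem.Dict.get?, h, List.find?, e1, e2, e3]
  split_ifs with h1 h2 h3
  · simp [h1]
  · simp [h2]
  · simp [h3]
  · simp [beq_eq_false_iff_ne.mpr h1, beq_eq_false_iff_ne.mpr h2, beq_eq_false_iff_ne.mpr h3]

-- B's rank-c-and-kept test is, pointwise, A's first-letter test
theorem pv_pred (c : Int) (ch : Char) (hc : (c = 0 ∧ ch = 'F') ∨ (c = 1 ∧ ch = 'V') ∨ (c = 2 ∧ ch = 'M'))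
    (n : String) :
    ((pvKey n == c) && ((PySem.Str.pyGet? n 0).bind (fun c => pvRank.get? c)).isSome) =
      (PySem.Str.pyGet? n 0 == some ch) := by
  unfold pvKey
  cases ho : PySem.Str.pyGet? n 0 with
  | none => rcases hc with ⟨h, h'⟩ | ⟨h, h'⟩ | ⟨h, h'⟩ <;> simp [h, h']
  | some c0 =>
      rw [Option.bind_some]  -- lookup on the actual first character
      rw [pvRank_get c0]
      by_cases hF : c0 = 'F'
      · rcases hc with ⟨h, h'⟩ | ⟨h, h'⟩ | ⟨h, h'⟩ <;> simp [h, h', hF]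
      · by_cases hV : c0 = 'V'
        · rcases hc with ⟨h, h'⟩ | ⟨h, h'⟩ | ⟨h, h'⟩ <;> simp [h, h', hV]
        · by_cases hM : c0 = 'M'
          · rcases hc with ⟨h, h'⟩ | ⟨h, h'⟩ | ⟨h, h'⟩ <;> simp [h, h', hM]
          · rcases hc with ⟨h, h'⟩ | ⟨h, h'⟩ | ⟨h, h'⟩ <;> simp [h, h', hF, hV, hM]

-- ===== VERDICT (by name: the statement is the Claim_ definition above) =====
theorem orderNames_spec : Claim_equal_orderNames := by
  intro oldNames _ _
  unfold Spec_orderNames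
  have hA : orderNames oldNames =
      (oldNames.filter (fun n => PySem.Str.pyGet? n 0 == some 'F')) ++
        (oldNames.filter (fun n => PySem.Str.pyGet? n 0 == some 'V')) ++
          (oldNames.filter (fun n => PySem.Str.pyGet? n 0 == some 'M')) := by
    unfold orderNames
    rw [PySem.List.foldl_append_if (fun name => PySem.Str.pyGet? name 0 == some 'F') (fun x => x),
        PySem.List.foldl_append_if (fun name => PySem.Str.pyGet? name 0 == some 'V') (fun x => x),
        PySem.List.foldl_append_if (fun name => PySem.Str.pyGet? name 0 == some 'M') (fun x => x)]
    simp [List.map_id', List.append_assoc]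
  have hkept : ∀ y ∈ oldNames.filter (fun n => ((PySem.Str.pyGet? n 0).bind (fun c => pvRank.get? c)).isSome),
      pvKey y = 0 ∨ pvKey y = 1 ∨ pvKey y = 2 := by
    intro y hy
    have hk := (List.mem_filter.mp hy).2
    unfold pvKey
    cases ho : PySem.Str.pyGet? y 0 with
    | none => rw [ho] at hk; simp at hk
    | some c0 =>
        rw [ho] at hk
        rw [Option.bind_some] at hk ⊢
        rw [pvRank_get c0] at hk ⊢
        split_ifs with h1 h2 h3 <;> simp_all
  have hB : orderNames_alt oldNames =
      ((oldNames.filter (fun n => ((PySem.Str.pyGet? n 0).bind (fun c => pvRank.get? c)).isSome)).filter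
          (fun y => pvKey y == 0)) ++
        ((oldNames.filter (fun n => ((PySem.Str.pyGet? n 0).bind (fun c => pvRank.get? c)).isSome)).filter
            (fun y => pvKey y == 1)) ++
          ((oldNames.filter (fun n => ((PySem.Str.pyGet? n 0).bind (fun c => pvRank.get? c)).isSome)).filter
              (fun y => pvKey y == 2)) := by
    unfold orderNames_alt
    rw [PySem.List.sorted_eq_foldl_insertBy]
    have := pv_buckets pvKey
      (oldNames.filter (fun n => ((PySem.Str.pyGet? n 0).bind (fun c => pvRank.get? c)).isSome))
      [] [] [] hkept (by simp) (by simp) (by simp)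
    simpa [List.append_assoc] using this
  rw [hA, hB]
  rw [List.filter_filter, List.filter_filter, List.filter_filter]
  rw [List.filter_congr (fun n _ => pv_pred 0 'F' (by simp) n),
      List.filter_congr (fun n _ => pv_pred 1 'V' (by simp) n),
      List.filter_congr (fun n _ => pv_pred 2 'M' (by simp) n)]
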